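-- pv_equiv track=rewrite | github.com/philippe-chartrand/FilesComparer | comparelib/comparisons.py | index_by_checksum
-- ===== SOURCE A (Python) =====
-- def index_by_checksum(items):
--     checksums = {}
--     for k, v in items.items():
--         if not v['md5'] in checksums:
--             checksums[v['md5']] = [k]
--         else:
--             checksums[v['md5']].append(k)
--     return checksums
-- ===== SOURCE B (Python) =====
-- def index_by_checksum(items):
--     # two-pass grouping: collect checksums in first-occurrence order, then
--     # gather the keys of each checksum with a filtering pass
--     order = []
--     for v in items.values():
--         m = v['md5']
--         if m not in order:
--             order.append(m)
--     return {m: [k for k, w in items.items() if w['md5'] == m] for m in order}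
-- ===== Notes on version B (the rewrite author's own statement) =====
-- stated objective: alternative
-- what changed: A builds the grouping dict in one pass with per-item membership tests and appends; B first collects the distinct checksums in first-occurrence order and then builds each group by an independent filtering pass over the items.
import Mathlib
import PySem

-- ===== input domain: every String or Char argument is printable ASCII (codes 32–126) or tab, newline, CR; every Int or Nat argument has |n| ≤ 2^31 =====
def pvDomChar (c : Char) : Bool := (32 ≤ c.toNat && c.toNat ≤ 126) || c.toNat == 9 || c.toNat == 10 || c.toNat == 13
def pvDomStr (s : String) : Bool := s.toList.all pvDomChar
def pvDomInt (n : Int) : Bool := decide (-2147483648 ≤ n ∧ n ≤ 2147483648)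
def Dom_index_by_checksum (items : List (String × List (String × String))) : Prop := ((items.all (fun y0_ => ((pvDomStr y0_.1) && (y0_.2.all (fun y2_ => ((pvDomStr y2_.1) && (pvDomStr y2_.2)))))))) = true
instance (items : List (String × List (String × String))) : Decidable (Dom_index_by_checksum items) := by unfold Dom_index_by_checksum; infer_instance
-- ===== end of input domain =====

-- B replaces A's one-pass dict accumulation by a two-pass scheme (distinct checksums first,
-- then one filtering pass per checksum); equivalence of RETURN values, A raises outside Pre_.

-- v['md5'] on the inner dict (total form: default "", exact under Pre_ which requires the key)
def pvMd5 (v : List (String × String)) : String := (PySem.Dict.ofList v).getD "md5" ""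

-- ===== PORT A =====
def index_by_checksum (items : List (String × List (String × String))) : List (String × List String) :=
  (items.foldl (fun checksums kv =>
      let m := pvMd5 kv.2
      if checksums.contains m = false then
        checksums.insert m [kv.1]
      else
        -- checksums[m].append(k) : d[m] = d[m] + [k]
        checksums.modify m [] (fun l => l ++ [kv.1]))
    PySem.Dict.empty).items

-- ===== PORT B =====
def index_by_checksum_alt (items : List (String × List (String × String))) : List (String × List String) :=
  let order := items.foldl (fun order kv =>
      let m := pvMd5 kv.2
      if m ∈ order then order else order ++ [m]) []
  order.map (fun m => (m, (items.filter (fun kv => pvMd5 kv.2 == m)).map (·.1)))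

-- ===== PRECONDITION & SPEC =====
-- Pre_ excludes exactly the inputs where a value dict lacks the 'md5' key: there Python A raises KeyError.
def Pre_index_by_checksum (items : List (String × List (String × String))) : Prop :=
  ∀ kv ∈ items, (PySem.Dict.ofList kv.2).contains "md5" = true
instance (items : List (String × List (String × String))) : Decidable (Pre_index_by_checksum items) := by unfold Pre_index_by_checksum; infer_instance
def pvWitness_index_by_checksum : (List (String × List (String × String))) :=
  [("a", [("md5", "x")]), ("b", [("md5", "y")]), ("c", [("md5", "x")])]

def Spec_index_by_checksum (items : List (String × List (String × String))) (out : List (String × List String)) : Prop := out = index_by_checksum_alt items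
instance (items : List (String × List (String × String))) (out : List (String × List String)) : Decidable (Spec_index_by_checksum items out) := by unfold Spec_index_by_checksum; infer_instance

-- ===== CLAIM (what is proved, stated in full; the proofs are below) =====
def Claim_equal_index_by_checksum : Prop := ∀ (items : List (String × List (String × String))), Dom_index_by_checksum items → Pre_index_by_checksum items → Spec_index_by_checksum items (index_by_checksum items)

-- ===== LEMMAS AND PROOFS =====

-- A's branching step is exactly a Dict.modify step
theorem pv_stepA_eq_modify (d : PySem.Dict String (List String)) (kv : String × List (String × String)) :
    (let m := pvMd5 kv.2
     if d.contains m = false then d.insert m [kv.1]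
     else d.modify m [] (fun l => l ++ [kv.1]))
    = d.modify (pvMd5 kv.2) [] (fun l => l ++ [kv.1]) := by
  simp only []
  split
  · rename_i h
    simp [PySem.Dict.modify, PySem.Dict.getD_of_not_contains, h]
  · rfl

theorem pv_foldA_eq (items : List (String × List (String × String))) :
    items.foldl (fun checksums kv =>
      let m := pvMd5 kv.2
      if checksums.contains m = false then checksums.insert m [kv.1]
      else checksums.modify m [] (fun l => l ++ [kv.1])) PySem.Dict.empty
    = (items.map (fun kv => (pvMd5 kv.2, kv.1))).foldl
        (fun d p => d.modify p.1 [] (fun l => l ++ [p.2])) PySem.Dict.empty := by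
  rw [List.foldl_map]
  apply PySem.List.foldl_congr_mem
  intro d kv _
  exact pv_stepA_eq_modify d kv

-- ===== VERDICT (by name: the statement is the Claim_ definition above) =====
theorem index_by_checksum_spec : Claim_equal_index_by_checksum := by
  intro items _ _
  unfold Spec_index_by_checksum index_by_checksum index_by_checksum_alt
  rw [pv_foldA_eq]
  set l := items.map (fun kv => (pvMd5 kv.2, kv.1)) with hl
  set D := l.foldl (fun d p => d.modify p.1 [] (fun ls => ls ++ [p.2])) PySem.Dict.empty with hD
  have hnd : D.keys.Nodup := by
    apply PySem.Dict.nodup_keys_foldl_modify_key l Prod.fst [] (fun d p => fun ls => ls ++ [p.2])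
    simp [PySem.Dict.keys_empty]
  have hkeys : D.keys = PySem.Set.update PySem.Dict.empty.keys (l.map Prod.fst) :=
    PySem.Dict.keys_foldl_modify_key l Prod.fst [] _ _
  have horder : items.foldl (fun order kv =>
      let m := pvMd5 kv.2
      if m ∈ order then order else order ++ [m]) [] = D.keys := by
    rw [hkeys]
    simp only [PySem.Dict.keys_empty, hl, List.map_map]
    rw [PySem.Set.update_map_eq_foldl_add]
    apply PySem.List.foldl_congr_mem
    intro s kv _
    simp [PySem.Set.add_eq_ite]
  rw [PySem.Dict.items_eq_map_keys D hnd [], ← horder]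
  apply List.map_congr_left
  intro m _
  refine Prod.ext rfl ?_
  have := PySem.Dict.getD_foldl_modify_append (l := l) (d := PySem.Dict.empty) (c := m)
  simp only [← hD] at this
  rw [this]
  simp [hl, List.filter_map, Function.comp_def]
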